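-- pv_equiv track=rewrite | github.com/easyhutu/cloud-site | helper/to_html.py | type_txt
-- ===== SOURCE A (Python) =====
-- def type_txt(data):
--     data = data.split('\n')
--     add_p = []
--     for da in data:
--         add_p.append(f'<p>{da}</p>')
--     das = ''.join(add_p).replace('\b', '&nbsp;').replace('\r', '<br>')
--     add_code = f'<article>{das}</article>'
--     return add_code
-- ===== SOURCE B (Python) =====
-- def type_txt(data):
--     sub = {'\n': '</p><p>', '\b': '&nbsp;', '\r': '<br>'}
--     body = ''.join(sub.get(c, c) for c in data)
--     return '<article><p>' + body + '</p></article>'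
-- ===== Notes on version B (the rewrite author's own statement) =====
-- stated objective: alternative
-- what changed: Replaces the split/per-line-wrap/join pipeline plus two staged string replacements with one single character-by-character pass that maps each special character ('\n', '\b', '\r') to its HTML substitute via a table and concatenates the results inside a fixed paragraph wrapper.
import Mathlib
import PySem

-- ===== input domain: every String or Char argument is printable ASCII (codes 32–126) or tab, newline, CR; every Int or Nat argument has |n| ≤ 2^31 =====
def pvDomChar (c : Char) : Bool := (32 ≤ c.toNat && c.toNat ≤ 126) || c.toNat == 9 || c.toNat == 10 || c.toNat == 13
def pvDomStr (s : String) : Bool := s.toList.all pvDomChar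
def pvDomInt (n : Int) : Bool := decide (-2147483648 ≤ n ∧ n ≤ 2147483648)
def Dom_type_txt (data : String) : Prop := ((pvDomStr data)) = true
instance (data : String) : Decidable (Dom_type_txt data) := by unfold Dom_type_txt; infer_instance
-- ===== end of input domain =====

-- B replaces A's split / per-line wrap / join plus two staged replaces by one per-character table lookup pass (same cost, different algorithm).

-- ===== PORT A =====
def type_txt (data : String) : String :=
  let parts := PySem.Chars.splitOn data.toList ['\n']
  let add_p := parts.foldl (fun acc da => acc ++ ["<p>".toList ++ da ++ "</p>".toList]) []
  let das := PySem.Chars.replace (PySem.Chars.replace (PySem.Chars.join [] add_p)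
      ['\x08'] "&nbsp;".toList) ['\r'] "<br>".toList
  String.ofList ("<article>".toList ++ das ++ "</article>".toList)

-- ===== PORT B =====
-- the substitution table sub.get(c, c) of Source B
def pvSub (c : Char) : List Char :=
  PySem.Dict.getD (PySem.Dict.ofList
    [('\n', "</p><p>".toList), ('\x08', "&nbsp;".toList), ('\r', "<br>".toList)]) c [c]

def type_txt_alt (data : String) : String :=
  let body := data.toList.flatMap pvSub        -- ''.join(sub.get(c, c) for c in data)
  String.ofList ("<article><p>".toList ++ body ++ "</p></article>".toList)

-- ===== PRECONDITION & SPEC =====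
def Spec_type_txt (data : String) (out : String) : Prop := out = type_txt_alt data
instance (data : String) (out : String) : Decidable (Spec_type_txt data out) := by unfold Spec_type_txt; infer_instance

-- ===== CLAIM (what is proved, stated in full; the proofs are below) =====
def Claim_equal_type_txt : Prop := ∀ (data : String), Dom_type_txt data → Spec_type_txt data (type_txt data)

-- ===== LEMMAS AND PROOFS =====

-- simple recursive characterisations of single-char-separator split and replace
def pvSplit1 (cur : List Char) : List Char → List (List Char)
  | [] => [cur]
  | c :: t => if c = '\n' then cur :: pvSplit1 [] t else pvSplit1 (cur ++ [c]) t

def pvRep1 (sep : Char) (new : List Char) : List Char → List Char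
  | [] => []
  | c :: t => if c = sep then new ++ pvRep1 sep new t else c :: pvRep1 sep new t

lemma pvSplit1_ne_nil (cur l : List Char) : pvSplit1 cur l ≠ [] := by
  induction l generalizing cur with
  | nil => simp [pvSplit1]
  | cons c t ih => by_cases hc : c = '\n' <;> simp [pvSplit1, hc, ih]

lemma go_split (fuel : Nat) : ∀ (l cur : List Char) (accs : List (List Char)),
    l.length ≤ fuel →
    PySem.Chars.splitOn.go ['\n'] fuel l cur accs = accs.reverse ++ pvSplit1 cur.reverse l := by
  induction fuel with
  | zero =>
    intro l cur accs h
    have hl : l = [] := by cases l <;> simp_all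
    subst hl
    rw [PySem.Chars.splitOn.go]
    simp [pvSplit1]
  | succ n ih =>
    intro l cur accs h
    cases l with
    | nil =>
      rw [PySem.Chars.splitOn.go]
      simp [pvSplit1]
      omega
    | cons c t =>
      rw [PySem.Chars.splitOn.go]
      by_cases hc : c = '\n'
      · subst hc
        simp only [List.isPrefixOf, Bool.and_true, beq_self_eq_true,
          if_true, List.length_singleton, List.drop_succ_cons, List.drop_zero]
        rw [ih t [] (cur.reverse :: accs) (by simpa using Nat.le_of_succ_le_succ h)]
        simp [pvSplit1]
      · have hpre : List.isPrefixOf ['\n'] (c :: t) = false := by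
          simp only [List.isPrefixOf, Bool.and_true]
          exact beq_eq_false_iff_ne.mpr (fun h => hc (Eq.symm h))
        simp only [hpre, Bool.false_eq_true, if_false]
        rw [ih t (c :: cur) accs (by simpa using Nat.le_of_succ_le_succ h)]
        simp [pvSplit1, hc]

lemma go_rep (sep : Char) (new : List Char) (fuel : Nat) : ∀ (l acc : List Char),
    l.length ≤ fuel →
    PySem.Chars.replace.go [sep] new fuel l acc = acc.reverse ++ pvRep1 sep new l := by
  induction fuel with
  | zero =>
    intro l acc h
    have hl : l = [] := by cases l <;> simp_all
    subst hl
    rw [PySem.Chars.replace.go]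
    simp [pvRep1]
  | succ n ih =>
    intro l acc h
    cases l with
    | nil =>
      rw [PySem.Chars.replace.go]
      simp [pvRep1]
      omega
    | cons c t =>
      rw [PySem.Chars.replace.go]
      by_cases hc : c = sep
      · subst hc
        simp only [List.isPrefixOf, Bool.and_true, beq_self_eq_true,
          if_true, List.length_singleton, List.drop_succ_cons, List.drop_zero]
        rw [ih t (new.reverse ++ acc) (by simpa using Nat.le_of_succ_le_succ h)]
        simp [pvRep1]
      · have hpre : List.isPrefixOf [sep] (c :: t) = false := by
          simp only [List.isPrefixOf, Bool.and_true]
          exact beq_eq_false_iff_ne.mpr (fun h => hc (Eq.symm h))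
        simp only [hpre, Bool.false_eq_true, if_false]
        rw [ih t (c :: acc) (by simpa using Nat.le_of_succ_le_succ h)]
        simp [pvRep1, hc]

lemma splitOn_newline (cs : List Char) :
    PySem.Chars.splitOn cs ['\n'] = pvSplit1 [] cs := by
  unfold PySem.Chars.splitOn
  rw [go_split (cs.length + 1) cs [] [] (by omega)]
  simp

lemma replace_one (sep : Char) (cs new : List Char) :
    PySem.Chars.replace cs [sep] new = pvRep1 sep new cs := by
  unfold PySem.Chars.replace
  simp only [List.isEmpty_cons, Bool.false_eq_true, if_false]
  rw [go_rep sep new cs.length cs [] (le_refl _)]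
  simp

lemma pvRep1_append (sep : Char) (new : List Char) (a b : List Char) :
    pvRep1 sep new (a ++ b) = pvRep1 sep new a ++ pvRep1 sep new b := by
  induction a with
  | nil => simp [pvRep1]
  | cons c t ih => by_cases hc : c = sep <;> simp [pvRep1, hc, ih]

-- joining the wrapped pieces of the split equals one bulk replacement of '\n'
lemma join_wrap_split (P Q : List Char) : ∀ (l cur : List Char),
    PySem.Chars.join [] ((pvSplit1 cur l).map (fun da => P ++ da ++ Q)) =
      P ++ cur ++ pvRep1 '\n' (Q ++ P) l ++ Q := by
  intro l
  induction l with
  | nil =>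
    intro cur
    simp [pvSplit1, pvRep1, PySem.Chars.join_singleton]
  | cons c t ih =>
    intro cur
    by_cases hc : c = '\n'
    · subst hc
      simp only [pvSplit1, if_true, List.map_cons, pvRep1]
      obtain ⟨q, rest, hq⟩ := List.exists_cons_of_ne_nil
        (mt List.map_eq_nil_iff.mp (pvSplit1_ne_nil [] t))
      rw [hq, PySem.Chars.join_cons_cons, ← hq, ih []]
      simp
    · simp only [pvSplit1, hc, if_false, pvRep1]
      rw [ih (cur ++ [c])]
      simp

-- the three staged single-char replacements collapse into one per-character map
lemma triple_rep (l : List Char) :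
    pvRep1 '\r' "<br>".toList (pvRep1 '\x08' "&nbsp;".toList
      (pvRep1 '\n' "</p><p>".toList l)) = l.flatMap pvSub := by
  induction l with
  | nil => simp [pvRep1]
  | cons c t ih =>
    have hstep : pvRep1 '\n' "</p><p>".toList (c :: t) =
        (if c = '\n' then "</p><p>".toList else [c]) ++ pvRep1 '\n' "</p><p>".toList t := by
      by_cases hc : c = '\n' <;> simp [pvRep1, hc]
    rw [hstep, pvRep1_append, pvRep1_append, ih]
    by_cases h1 : c = '\n'
    · subst h1
      rw [if_pos rfl,
        show pvRep1 '\r' "<br>".toList (pvRep1 '\x08' "&nbsp;".toList "</p><p>".toList)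
          = "</p><p>".toList from by decide]
      rw [List.flatMap_cons, show pvSub '\n' = "</p><p>".toList from by decide]
    · rw [if_neg h1]
      by_cases h2 : c = '\x08'
      · subst h2
        rw [show pvRep1 '\r' "<br>".toList (pvRep1 '\x08' "&nbsp;".toList ['\x08'])
            = "&nbsp;".toList from by decide]
        rw [List.flatMap_cons, show pvSub '\x08' = "&nbsp;".toList from by decide]
      · by_cases h3 : c = '\r'
        · subst h3
          rw [show pvRep1 '\r' "<br>".toList (pvRep1 '\x08' "&nbsp;".toList ['\r'])
              = "<br>".toList from by decide]
          rw [List.flatMap_cons, show pvSub '\r' = "<br>".toList from by decide]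
        · have hrep : pvRep1 '\r' "<br>".toList (pvRep1 '\x08' "&nbsp;".toList [c]) = [c] := by
            simp [pvRep1, h2, h3]
          have hsub : pvSub c = [c] := by
            have hd : PySem.Dict.ofList
                [('\n', "</p><p>".toList), ('\x08', "&nbsp;".toList), ('\r', "<br>".toList)]
                = PySem.Dict.mk
                [('\n', "</p><p>".toList), ('\x08', "&nbsp;".toList), ('\r', "<br>".toList)] := by
              decide
            unfold pvSub
            rw [hd]
            simp [PySem.Dict.getD,
              beq_eq_false_iff_ne.mpr (Ne.symm h1), beq_eq_false_iff_ne.mpr (Ne.symm h2),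
              beq_eq_false_iff_ne.mpr (Ne.symm h3), PySem.Dict.get?]
          rw [hrep]
          simp [List.flatMap_cons, hsub]

theorem type_txt_spec : Claim_equal_type_txt := by
  intro data _
  unfold Spec_type_txt type_txt type_txt_alt
  simp only [splitOn_newline, replace_one, PySem.List.foldl_append_singleton_eq_map, List.nil_append]
  rw [join_wrap_split "<p>".toList "</p>".toList data.toList []]
  simp only [List.append_nil]
  rw [pvRep1_append, pvRep1_append, pvRep1_append, pvRep1_append,
    show ("</p>".toList ++ "<p>".toList : List Char) = "</p><p>".toList from by decide,
    triple_rep,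
    show pvRep1 '\r' "<br>".toList (pvRep1 '\x08' "&nbsp;".toList "<p>".toList)
      = "<p>".toList from by decide,
    show pvRep1 '\r' "<br>".toList (pvRep1 '\x08' "&nbsp;".toList "</p>".toList)
      = "</p>".toList from by decide,
    show ("<article><p>".toList : List Char) = "<article>".toList ++ "<p>".toList from by decide,
    show ("</p></article>".toList : List Char) = "</p>".toList ++ "</article>".toList from by decide]
  simp [List.append_assoc]
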